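-- pv_equiv track=rewrite | github.com/karim-manaouil/virtiofs-cxl-experiments | fioctl.py | count_dirs
-- ===== SOURCE A (Python) =====
-- def count_dirs(nr_type_files, nr_files_per_dir):
--     nr_files = nr_type_files
--     nr_dirs = 0
--     taken = []
--
--     while nr_files:
--         if nr_files < nr_files_per_dir * 2:
--             take = nr_files
--         else:
--             take = nr_files_per_dir
--         nr_files -= take
--         taken.append(take)
--         nr_dirs += 1
--
--     return nr_dirs, taken
-- ===== SOURCE B (Python) =====
-- def count_dirs(nr_type_files, nr_files_per_dir):
--     n, p = nr_type_files, nr_files_per_dir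
--     if n == 0:
--         return 0, []
--     if n < 2 * p:
--         return 1, [n]
--     q, r = divmod(n, p)
--     if r == 0:
--         return q, [p] * q
--     return q, [p] * (q - 1) + [p + r]
-- ===== Notes on version B (the rewrite author's own statement) =====
-- stated objective: simpler
-- what changed: The append-and-subtract while loop is replaced by a closed form: q, r = divmod(n, p) and list multiplication, with the remainder folded into the last chunk; Pre_ excludes exactly the inputs (nr_type_files > 0 with nr_files_per_dir <= 0, and most negative/negative pairs) on which A loops forever.
import Mathlib
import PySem

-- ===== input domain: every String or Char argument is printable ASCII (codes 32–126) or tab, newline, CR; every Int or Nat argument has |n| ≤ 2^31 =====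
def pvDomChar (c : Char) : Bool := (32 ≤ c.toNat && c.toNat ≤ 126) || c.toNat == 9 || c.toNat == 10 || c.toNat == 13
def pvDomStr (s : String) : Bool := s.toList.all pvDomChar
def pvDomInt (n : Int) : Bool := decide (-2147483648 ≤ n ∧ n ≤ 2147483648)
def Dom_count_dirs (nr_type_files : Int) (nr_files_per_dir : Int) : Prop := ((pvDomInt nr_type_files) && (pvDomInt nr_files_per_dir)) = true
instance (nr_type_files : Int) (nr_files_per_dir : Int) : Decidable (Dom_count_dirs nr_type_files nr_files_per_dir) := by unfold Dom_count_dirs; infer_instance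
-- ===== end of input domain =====

-- B replaces A's append-and-subtract while loop by divmod arithmetic and list
-- multiplication (objective: simpler); equal to A on every input where A terminates.


-- ===== PORT A =====
-- A's while loop, with fuel to make it total; on every input admitted by
-- Pre_count_dirs the fuel nr_type_files.natAbs + 2 is enough (proved below).
def countLoopA (fuel : Nat) (nr_files nr_files_per_dir nr_dirs : Int) (taken : List Int) : Int × List Int :=
  match fuel with
  | 0 => (nr_dirs, taken)
  | fuel + 1 =>
    if nr_files = 0 then (nr_dirs, taken)
    else
      let take := if nr_files < nr_files_per_dir * 2 then nr_files else nr_files_per_dir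
      countLoopA fuel (nr_files - take) nr_files_per_dir (nr_dirs + 1) (taken ++ [take])

def count_dirs (nr_type_files : Int) (nr_files_per_dir : Int) : Int × List Int :=
  countLoopA (nr_type_files.natAbs + 2) nr_type_files nr_files_per_dir 0 []

-- ===== PORT B =====
def count_dirs_alt (nr_type_files : Int) (nr_files_per_dir : Int) : Int × List Int :=
  if nr_type_files = 0 then (0, [])
  else if nr_type_files < 2 * nr_files_per_dir then (1, [nr_type_files])
  else
    let q := PySem.Int.floordiv nr_type_files nr_files_per_dir
    let r := PySem.Int.mod nr_type_files nr_files_per_dir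
    if r = 0 then (q, List.replicate q.toNat nr_files_per_dir)
    else (q, List.replicate (q - 1).toNat nr_files_per_dir ++ [nr_files_per_dir + r])

-- ===== PRECONDITION & SPEC =====
-- Pre_ admits exactly the inputs on which Python A terminates (returns); outside it
-- A loops forever (e.g. nr_type_files > 0 with nr_files_per_dir ≤ 0), so nothing is excluded on which A returns.
def Pre_count_dirs (nr_type_files : Int) (nr_files_per_dir : Int) : Prop :=
  nr_type_files = 0 ∨ 0 < nr_files_per_dir ∨
    (nr_type_files < 0 ∧ (nr_type_files < 2 * nr_files_per_dir ∨
      nr_type_files = nr_files_per_dir ∨ nr_type_files = 2 * nr_files_per_dir))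
instance (nr_type_files : Int) (nr_files_per_dir : Int) : Decidable (Pre_count_dirs nr_type_files nr_files_per_dir) := by unfold Pre_count_dirs; infer_instance

def pvWitness_count_dirs : Int × Int := (10, 3)

def Spec_count_dirs (nr_type_files : Int) (nr_files_per_dir : Int) (out : Int × List Int) : Prop := out = count_dirs_alt nr_type_files nr_files_per_dir
instance (nr_type_files : Int) (nr_files_per_dir : Int) (out : Int × List Int) : Decidable (Spec_count_dirs nr_type_files nr_files_per_dir out) := by unfold Spec_count_dirs; infer_instance

-- ===== CLAIM (what is proved, stated in full; the proofs are below) =====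
def Claim_equal_count_dirs : Prop := ∀ (nr_type_files : Int) (nr_files_per_dir : Int), Dom_count_dirs nr_type_files nr_files_per_dir → Pre_count_dirs nr_type_files nr_files_per_dir → Spec_count_dirs nr_type_files nr_files_per_dir (count_dirs nr_type_files nr_files_per_dir)

-- ===== LEMMAS AND PROOFS =====

-- Unfolding B one chunk: for 0 < p and 2p ≤ n the first directory takes exactly p.
lemma alt_step (n p : Int) (hp : 0 < p) (hn : 2 * p ≤ n) :
    count_dirs_alt n p = ((count_dirs_alt (n - p) p).1 + 1, p :: (count_dirs_alt (n - p) p).2) := by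
  have hp0 : p ≠ 0 := by omega
  have hq2 : 2 ≤ n / p := Int.le_ediv_iff_mul_le hp |>.2 (by omega)
  have hdiv : (n - p) / p = n / p - 1 := by
    have h := Int.add_mul_ediv_right n (-1) hp0
    simpa [sub_eq_add_neg, neg_mul] using h
  have hmod : (n - p) % p = n % p := Int.sub_emod_right n p
  have hr0 : 0 ≤ n % p := Int.emod_nonneg n hp0
  have hrlt : n % p < p := Int.emod_lt_of_pos n hp
  unfold count_dirs_alt
  rw [PySem.Int.floordiv_eq_ediv_of_pos hp, PySem.Int.mod_eq_emod_of_pos hp,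
      PySem.Int.floordiv_eq_ediv_of_pos hp, PySem.Int.mod_eq_emod_of_pos hp]
  have hne : n ≠ 0 := by omega
  have hnlt : ¬ n < 2 * p := by omega
  have hnpne : n - p ≠ 0 := by omega
  simp only [hne, hnlt, if_false, hnpne, hdiv, hmod]
  by_cases hsmall : n - p < 2 * p
  · -- second-to-last chunk: q = 2
    have hq : n / p = 2 := by
      have := Int.ediv_lt_iff_lt_mul hp (a := n) (b := 3)
      omega
    simp only [hsmall, if_true, hq]
    by_cases hr : n % p = 0
    · have hn2 : n = 2 * p := by
        have h := Int.emod_add_ediv n p; rw [hr, hq] at h; linarith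
      simp [hr, hq, hn2, List.replicate]
      omega
    · have hnp : n - p = p + n % p := by
        have h := Int.emod_add_ediv n p; rw [hq] at h; linarith
      simp [hr, hq, hnp, List.replicate]
  · simp only [hsmall, if_false]
    by_cases hr : n % p = 0
    · have hq1 : n / p - 1 ≥ 1 := by omega
      simp only [hr, if_true]
      have hto : (n / p).toNat = ((n / p - 1).toNat) + 1 := by omega
      rw [hto, List.replicate_succ]
      have h11 : n / p - 1 + 1 = n / p := by omega
      rw [h11]
    · have hq3 : 3 ≤ n / p := by
        have := Int.le_ediv_iff_mul_le hp (a := 3) (b := n)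
        omega
      simp only [hr, if_false]
      have hto : (n / p - 1).toNat = ((n / p - 1 - 1).toNat) + 1 := by omega
      rw [hto, List.replicate_succ, List.cons_append]
      have h11 : n / p - 1 + 1 = n / p := by omega
      rw [h11]

-- A's loop, for positive chunk size, computes B's closed form.
lemma loopA_run (p : Int) (hp : 0 < p) :
    ∀ (k : Nat) (n d : Int) (acc : List Int) (fuel : Nat),
      0 < n → n ≤ (k : Int) → n.natAbs + 1 ≤ fuel →
      countLoopA fuel n p d acc = (d + (count_dirs_alt n p).1, acc ++ (count_dirs_alt n p).2) := by
  intro k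
  induction k with
  | zero => intro n d acc fuel h1 h2 _; omega
  | succ k ih =>
    intro n d acc fuel h1 h2 hfuel
    obtain ⟨f, rfl⟩ : ∃ f, fuel = f + 1 := ⟨fuel - 1, by omega⟩
    rw [countLoopA]
    have hne : n ≠ 0 := by omega
    simp only [hne, if_false]
    by_cases hsm : n < p * 2
    · -- last chunk: takes everything, next iteration stops
      simp only [hsm, if_true, sub_self]
      obtain ⟨g, rfl⟩ : ∃ g, f = g + 1 := ⟨f - 1, by omega⟩
      rw [countLoopA]
      have halt : count_dirs_alt n p = (1, [n]) := by
        unfold count_dirs_alt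
        simp only [hne, if_false]
        rw [if_pos (by omega)]
      simp [halt]
    · simp only [hsm, if_false]
      rw [ih (n - p) (d + 1) (acc ++ [p]) f (by omega) (by omega) (by omega)]
      rw [alt_step n p hp (by omega)]
      simp
      omega

-- ===== VERDICT (by name: the statement is the Claim_ definition above) =====
theorem count_dirs_spec : Claim_equal_count_dirs := by
  intro n p _ hpre
  unfold Spec_count_dirs count_dirs
  by_cases h0 : n = 0
  · subst h0; simp [countLoopA, count_dirs_alt]
  · by_cases hsm : n < 2 * p
    · -- single chunk for any sign of p
      obtain ⟨f, hf⟩ : ∃ f, n.natAbs + 2 = f + 1 + 1 := ⟨n.natAbs, by omega⟩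
      rw [hf, countLoopA]
      simp only [h0, if_false]
      rw [if_pos (by omega)]
      rw [sub_self, countLoopA]
      unfold count_dirs_alt
      simp only [h0, if_false]
      rw [if_pos hsm]
      simp
    · rcases hpre with h | hp | ⟨hneg, hca⟩
      · omega
      · -- main case: 0 < p, 2p ≤ n (so 0 < n)
        rw [loopA_run p hp n.toNat n 0 [] (n.natAbs + 2) (by omega) (by omega) (by omega)]
        simp
      · -- p ≤ 0 (else covered above), n = p or n = 2p, neither < 2p
        have hp0 : p ≠ 0 := by omega
        have hmodself : PySem.Int.mod p p = 0 :=
          (PySem.Int.mod_eq_zero_iff_dvd p p).2 (dvd_refl p)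
        have hdivself : PySem.Int.floordiv p p = 1 := by
          have h := PySem.Int.floordiv_mul_add_mod p p
          rw [hmodself, add_zero] at h
          exact mul_right_cancel₀ hp0 (by rw [one_mul]; exact h)
        have hmod2 : PySem.Int.mod (2 * p) p = 0 :=
          (PySem.Int.mod_eq_zero_iff_dvd (2 * p) p).2 ⟨2, by ring⟩
        have hdiv2 : PySem.Int.floordiv (2 * p) p = 2 := by
          have h := PySem.Int.floordiv_mul_add_mod (2 * p) p
          rw [hmod2, add_zero] at h
          exact mul_right_cancel₀ hp0 (by rw [h])
        rcases hca with h | h | h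
        · omega
        · -- n = p : one iteration taking p
          subst h
          obtain ⟨f, hf⟩ : ∃ f, n.natAbs + 2 = f + 1 + 1 := ⟨n.natAbs, by omega⟩
          rw [hf, countLoopA]
          simp only [h0, if_false]
          rw [if_neg (by omega), sub_self, countLoopA]
          unfold count_dirs_alt
          simp only [h0, if_false]
          rw [if_neg hsm]
          simp [hmodself, hdivself, List.replicate]
        · -- n = 2p : two iterations taking p each
          subst h
          have hpne : p ≠ 0 := hp0
          obtain ⟨f, hf⟩ : ∃ f, (2 * p).natAbs + 2 = f + 1 + 1 + 1 := ⟨(2 * p).natAbs - 1, by omega⟩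
          rw [hf, countLoopA]
          simp only [h0, if_false]
          rw [if_neg (by omega)]
          have h2p : 2 * p - p = p := by ring
          rw [h2p, countLoopA]
          simp only [hpne, if_false]
          rw [if_neg (by omega), sub_self, countLoopA]
          unfold count_dirs_alt
          simp only [h0, if_false]
          rw [if_neg hsm]
          simp [hmod2, hdiv2, List.replicate]
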